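-- pv_equiv track=rewrite | github.com/rytisss/PanelsDrillSegmentation | processing.py | split_image_to_tiles
-- ===== SOURCE A (Python) =====
-- def split_image_to_tiles(width, height, tile_width, tile_height, tile_overlay_X, tile_overlay_Y):
--     tile_regions = []
--     if tile_width > width or tile_height > height:
--         return tile_regions  # nothing to do in this case if tile is bigger than image
--
--     in_width_range = True
--     in_height_range = True
--     current_x = 0
--     current_y = 0
--     step_x = tile_width - tile_overlay_X
--     step_y = tile_height - tile_overlay_Y
--     last_iteration = False
--     while in_height_range:
--         in_width_range = True
--         current_x = 0
--         while in_width_range: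
--             # form region
--             if current_x >= width - tile_width - 1:
--                 current_x = width - tile_width - 1  # adapt region to fit into image
--                 in_width_range = False
--             region = (current_x, current_y, current_x + tile_width, current_y + tile_height)
--             tile_regions.append(region)
--             current_x += step_x
--         current_y += step_y
--         if last_iteration:
--             in_height_range = False
--         if current_y >= height - tile_height - 1:
--             current_y = height - tile_height
--             last_iteration = True
--         if tile_height == height:
--             break
--     return tile_regions
-- ===== SOURCE B (Python) =====
-- def split_image_to_tiles(width, height, tile_width, tile_height, tile_overlay_X, tile_overlay_Y):
--     if tile_width > width or tile_height > height:
--         return []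
--     step_x = tile_width - tile_overlay_X
--     step_y = tile_height - tile_overlay_Y
--     # the x start-coordinates are the same for every row: compute them once
--     xs = []
--     x = 0
--     while True:
--         if x >= width - tile_width - 1:
--             xs.append(width - tile_width - 1)
--             break
--         xs.append(x)
--         x += step_x
--     # the y start-coordinates (clamp to height - tile_height, one extra last row)
--     ys = []
--     y = 0
--     last = False
--     while True:
--         ys.append(y)
--         y += step_y
--         if tile_height == height or last:
--             break
--         if y >= height - tile_height - 1:
--             y = height - tile_height
--             last = True
--     return [(x, y, x + tile_width, y + tile_height) for y in ys for x in xs]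
-- ===== Notes on version B (the rewrite author's own statement) =====
-- stated objective: alternative
-- what changed: Instead of A's nested while-loops that redo the x clamp/step logic for every row, B computes the list of x start-coordinates once and the list of y start-coordinates once with two independent while-loops, then emits the tiles as their cartesian product in the same row-major order.
import Mathlib
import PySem

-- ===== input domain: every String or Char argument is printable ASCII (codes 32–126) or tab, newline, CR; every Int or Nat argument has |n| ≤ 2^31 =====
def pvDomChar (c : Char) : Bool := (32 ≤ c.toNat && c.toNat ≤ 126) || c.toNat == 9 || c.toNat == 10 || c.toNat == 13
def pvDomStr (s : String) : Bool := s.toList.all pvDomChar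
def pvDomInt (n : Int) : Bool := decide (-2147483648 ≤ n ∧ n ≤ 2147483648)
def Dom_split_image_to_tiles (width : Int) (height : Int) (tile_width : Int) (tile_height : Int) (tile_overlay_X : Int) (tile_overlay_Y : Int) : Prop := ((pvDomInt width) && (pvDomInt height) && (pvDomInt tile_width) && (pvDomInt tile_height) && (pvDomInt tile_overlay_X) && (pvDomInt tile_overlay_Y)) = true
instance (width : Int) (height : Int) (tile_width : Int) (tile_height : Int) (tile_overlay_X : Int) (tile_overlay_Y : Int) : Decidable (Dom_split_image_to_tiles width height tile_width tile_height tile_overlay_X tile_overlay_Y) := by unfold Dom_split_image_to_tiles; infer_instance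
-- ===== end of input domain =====

-- B precomputes the x start-coordinates once and the y start-coordinates once, then emits
-- the tiles as a product (alternative decomposition; same asymptotic cost).


-- Fuel bound for the while-loops: on Dom (|n| ≤ 2^31) any terminating run of the Python
-- loops takes < 2^33 iterations, so the fuel is never exhausted where the Python returns.
-- (On step ≤ 0 inputs where both Pythons loop forever, both ports consistently run out of
-- the same fuel, so the equivalence of the two ports is unconditional.)
def pvFuel : Nat := 2 ^ 33

-- ===== PORT A =====
-- inner while-loop of A: appends one region per step, clamps x to width-tile_width-1 and exits
def aInnerLoop (width tile_width tile_height step_x y : Int) :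
    Nat → Int → List (Int × Int × Int × Int) → List (Int × Int × Int × Int)
  | 0, _, acc => acc
  | f+1, cx, acc =>
    if cx ≥ width - tile_width - 1 then
      acc ++ [(width - tile_width - 1, y, width - tile_width - 1 + tile_width, y + tile_height)]
    else
      aInnerLoop width tile_width tile_height step_x y f (cx + step_x)
        (acc ++ [(cx, y, cx + tile_width, y + tile_height)])

-- outer while-loop of A: one row per step; last_iteration extra row; tile_height==height break
def aOuterLoop (width height tile_width tile_height step_x step_y : Int) :
    Nat → Int → Bool → List (Int × Int × Int × Int) → List (Int × Int × Int × Int)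
  | 0, _, _, acc => acc
  | f+1, cy, last, acc =>
    let acc2 := aInnerLoop width tile_width tile_height step_x cy pvFuel 0 acc
    let p := if cy + step_y ≥ height - tile_height - 1 then (height - tile_height, true)
             else (cy + step_y, last)
    if tile_height = height then acc2
    else if last then acc2
    else aOuterLoop width height tile_width tile_height step_x step_y f p.1 p.2 acc2

def split_image_to_tiles (width : Int) (height : Int) (tile_width : Int) (tile_height : Int) (tile_overlay_X : Int) (tile_overlay_Y : Int) : List (Int × Int × Int × Int) :=
  if tile_width > width ∨ tile_height > height then []
  else aOuterLoop width height tile_width tile_height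
        (tile_width - tile_overlay_X) (tile_height - tile_overlay_Y) pvFuel 0 false []

-- ===== PORT B =====
-- B's first while-loop: the x start-coordinates (same for every row)
def bXs (width tile_width step_x : Int) : Nat → Int → List Int
  | 0, _ => []
  | f+1, x =>
    if x ≥ width - tile_width - 1 then [width - tile_width - 1]
    else x :: bXs width tile_width step_x f (x + step_x)

-- B's second while-loop: the y start-coordinates
def bYs (height tile_height step_y : Int) : Nat → Int → Bool → List Int
  | 0, _, _ => []
  | f+1, y, last =>
    y :: (if tile_height = height ∨ last then []
          else if y + step_y ≥ height - tile_height - 1 then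
            bYs height tile_height step_y f (height - tile_height) true
          else bYs height tile_height step_y f (y + step_y) last)

def split_image_to_tiles_alt (width : Int) (height : Int) (tile_width : Int) (tile_height : Int) (tile_overlay_X : Int) (tile_overlay_Y : Int) : List (Int × Int × Int × Int) :=
  if tile_width > width ∨ tile_height > height then []
  else
    let xs := bXs width tile_width (tile_width - tile_overlay_X) pvFuel 0
    let ys := bYs height tile_height (tile_height - tile_overlay_Y) pvFuel 0 false
    ys.flatMap (fun y => xs.map (fun x => (x, y, x + tile_width, y + tile_height)))

-- ===== PRECONDITION & SPEC =====
def Spec_split_image_to_tiles (width : Int) (height : Int) (tile_width : Int) (tile_height : Int) (tile_overlay_X : Int) (tile_overlay_Y : Int) (out : List (Int × Int × Int × Int)) : Prop := out = split_image_to_tiles_alt width height tile_width tile_height tile_overlay_X tile_overlay_Y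
instance (width : Int) (height : Int) (tile_width : Int) (tile_height : Int) (tile_overlay_X : Int) (tile_overlay_Y : Int) (out : List (Int × Int × Int × Int)) : Decidable (Spec_split_image_to_tiles width height tile_width tile_height tile_overlay_X tile_overlay_Y out) := by unfold Spec_split_image_to_tiles; infer_instance

-- ===== CLAIM (what is proved, stated in full; the proofs are below) =====
def Claim_equal_split_image_to_tiles : Prop := ∀ (width : Int) (height : Int) (tile_width : Int) (tile_height : Int) (tile_overlay_X : Int) (tile_overlay_Y : Int), Dom_split_image_to_tiles width height tile_width tile_height tile_overlay_X tile_overlay_Y → Spec_split_image_to_tiles width height tile_width tile_height tile_overlay_X tile_overlay_Y (split_image_to_tiles width height tile_width tile_height tile_overlay_X tile_overlay_Y)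

-- ===== LEMMAS AND PROOFS =====
-- A's inner loop appends exactly one region per x start-coordinate of B's xs list.
theorem aInner_eq_bXs (width tile_width tile_height step_x y : Int) :
    ∀ (f : Nat) (cx : Int) (acc : List (Int × Int × Int × Int)),
      aInnerLoop width tile_width tile_height step_x y f cx acc =
        acc ++ (bXs width tile_width step_x f cx).map
          (fun x => (x, y, x + tile_width, y + tile_height)) := by
  intro f
  induction f with
  | zero => intro cx acc; simp [aInnerLoop, bXs]
  | succ f ih =>
    intro cx acc
    simp only [aInnerLoop, bXs]
    split
    · simp
    · rw [ih]; simp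

-- A's outer loop is the concatenation, over B's ys list, of one full row each.
theorem aOuter_eq_bYs (width height tile_width tile_height step_x step_y : Int) :
    ∀ (f : Nat) (cy : Int) (last : Bool) (acc : List (Int × Int × Int × Int)),
      aOuterLoop width height tile_width tile_height step_x step_y f cy last acc =
        acc ++ (bYs height tile_height step_y f cy last).flatMap
          (fun y => (bXs width tile_width step_x pvFuel 0).map
            (fun x => (x, y, x + tile_width, y + tile_height))) := by
  intro f
  induction f with
  | zero => intro cy last acc; simp [aOuterLoop, bYs]
  | succ f ih =>
    intro cy last acc
    simp only [aOuterLoop, bYs, aInner_eq_bXs]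
    by_cases hth : tile_height = height
    · simp [hth]
    · by_cases hl : last = true
      · simp [hth, hl]
      · simp only [Bool.not_eq_true] at hl
        subst hl
        by_cases hc : cy + step_y ≥ height - tile_height - 1
        · simp [hth, hc, ih]
        · simp [hth, hc, ih]

-- ===== VERDICT (by name: the statement is the Claim_ definition above) =====
theorem split_image_to_tiles_spec : Claim_equal_split_image_to_tiles := by
  intro width height tile_width tile_height tile_overlay_X tile_overlay_Y _
  unfold Spec_split_image_to_tiles split_image_to_tiles split_image_to_tiles_alt
  split
  · rfl
  · exact aOuter_eq_bYs width height tile_width tile_height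
      (tile_width - tile_overlay_X) (tile_height - tile_overlay_Y) pvFuel 0 false []
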